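-- pv_equiv track=rewrite | github.com/crim-ca/RACS | jassrealtime/webapi/handlers/search_documents.py | group_targets
-- ===== SOURCE A (Python) =====
-- def group_targets(targets: list) -> dict:
--     """
--     Group targets by corpus.
--     :param targets: pairs of corpus/bucket.
--     """
--     grouped_targets = {}
--     for corpus, bucket in targets:
--
--         if corpus not in grouped_targets:
--             grouped_targets[corpus] = []
--
--         if bucket is not None:
--             grouped_targets[corpus].append(bucket)
--
--     return grouped_targets
-- ===== SOURCE B (Python) =====
-- def group_targets(targets: list) -> dict:
--     """
--     Group targets by corpus.
--     :param targets: pairs of corpus/bucket.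
--     """
--     keys = dict.fromkeys(corpus for corpus, _ in targets)
--     return {corpus: [bucket for c, bucket in targets if c == corpus and bucket is not None]
--             for corpus in keys}
-- ===== Notes on version B (the rewrite author's own statement) =====
-- stated objective: alternative
-- what changed: Replaces A's single incremental grouping pass (conditional insert + conditional append per element) by first computing the ordered distinct corpora with dict.fromkeys and then building each group with a separate filtered scan of the input.
import Mathlib
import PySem

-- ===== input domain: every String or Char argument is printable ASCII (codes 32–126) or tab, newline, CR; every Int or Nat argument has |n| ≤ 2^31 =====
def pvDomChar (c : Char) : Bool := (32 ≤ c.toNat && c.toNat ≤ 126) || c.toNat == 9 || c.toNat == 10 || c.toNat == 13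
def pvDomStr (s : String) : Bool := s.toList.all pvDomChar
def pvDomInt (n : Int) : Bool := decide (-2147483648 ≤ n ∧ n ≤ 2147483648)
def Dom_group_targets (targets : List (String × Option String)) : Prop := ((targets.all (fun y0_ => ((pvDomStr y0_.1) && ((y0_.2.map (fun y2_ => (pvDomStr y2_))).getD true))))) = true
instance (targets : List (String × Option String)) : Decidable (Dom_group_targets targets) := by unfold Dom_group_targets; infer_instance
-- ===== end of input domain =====

-- B builds the ordered distinct corpora first, then one filtered scan per corpus, instead of A's single incremental grouping pass; same result.

-- ===== PORT A =====
-- one iteration of A's loop body: conditional fresh insert, then conditional append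
def group_targets_step (d : PySem.Dict String (List String)) (p : String × Option String) :
    PySem.Dict String (List String) :=
  let d1 := if d.contains p.1 then d else d.insert p.1 []
  match p.2 with
  | some b => d1.modify p.1 [] (fun l => l ++ [b])
  | none => d1

def group_targets (targets : List (String × Option String)) : List (String × List String) :=
  (targets.foldl group_targets_step PySem.Dict.empty).items

-- ===== PORT B =====
def group_targets_alt (targets : List (String × Option String)) : List (String × List String) :=
  let keys := PySem.List.dedup (targets.map Prod.fst)
  keys.map (fun corpus => (corpus, targets.filterMap (fun p => if p.1 = corpus then p.2 else none)))

-- ===== PRECONDITION & SPEC =====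
def Spec_group_targets (targets : List (String × Option String)) (out : List (String × List String)) : Prop := out = group_targets_alt targets
instance (targets : List (String × Option String)) (out : List (String × List String)) : Decidable (Spec_group_targets targets out) := by unfold Spec_group_targets; infer_instance

-- ===== CLAIM (what is proved, stated in full; the proofs are below) =====
def Claim_equal_group_targets : Prop := ∀ (targets : List (String × Option String)), Dom_group_targets targets → Spec_group_targets targets (group_targets targets)

-- ===== LEMMAS AND PROOFS =====

lemma step_keys (d : PySem.Dict String (List String)) (p : String × Option String) :
    (group_targets_step d p).keys = PySem.Set.add d.keys p.1 := by
  unfold group_targets_step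
  by_cases h : d.contains p.1 = true
  · have hm : p.1 ∈ d.keys := (PySem.Dict.contains_iff_mem_keys d p.1).mp h
    cases p.2 with
    | none => rw [if_pos h]; simp [PySem.Set.add, PySem.Set.contains, hm]
    | some b =>
      rw [if_pos h, PySem.Dict.keys_modify, PySem.Dict.keys_insert_of_contains d _ h]
      simp [PySem.Set.add, PySem.Set.contains, hm]
  · have h' : d.contains p.1 = false := by simpa using h
    have hm : p.1 ∉ d.keys := fun hmem => h ((PySem.Dict.contains_iff_mem_keys d p.1).mpr hmem)
    cases p.2 with
    | none =>
      rw [if_neg h, PySem.Dict.keys_insert_of_not_contains d _ h']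
      simp [PySem.Set.add, PySem.Set.contains, hm]
    | some b =>
      rw [if_neg h, PySem.Dict.keys_modify,
          PySem.Dict.keys_insert_of_contains _ _ (PySem.Dict.contains_insert_self d p.1 []),
          PySem.Dict.keys_insert_of_not_contains d _ h']
      simp [PySem.Set.add, PySem.Set.contains, hm]

lemma step_nodup (d : PySem.Dict String (List String)) (p : String × Option String)
    (h : d.keys.Nodup) : (group_targets_step d p).keys.Nodup := by
  rw [step_keys]
  unfold PySem.Set.add
  by_cases hm : p.1 ∈ d.keys
  · simpa [PySem.Set.contains, hm] using h
  · simp only [PySem.Set.contains, List.contains_eq_mem, hm, decide_false, Bool.false_eq_true,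
      if_false]
    simp [List.nodup_append, h]
    exact fun a ha hx => hm (hx ▸ ha)

lemma step_getD (d : PySem.Dict String (List String)) (p : String × Option String) (c : String) :
    (group_targets_step d p).getD c [] =
      d.getD c [] ++ (if p.1 = c then p.2.toList else []) := by
  unfold group_targets_step
  by_cases h : d.contains p.1 = true
  · cases p.2 with
    | none => rw [if_pos h]; simp
    | some b =>
      rw [if_pos h, PySem.Dict.getD_modify]
      by_cases hc : c = p.1
      · subst hc; simp
      · rw [if_neg hc, if_neg (fun hx => hc hx.symm)]; simp
  · have h' : d.contains p.1 = false := by simpa using h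
    cases p.2 with
    | none =>
      rw [if_neg h, PySem.Dict.getD_insert]
      by_cases hc : c = p.1
      · subst hc; simp [PySem.Dict.getD_of_not_contains d _ h']
      · rw [if_neg hc, if_neg (fun hx => hc hx.symm)]; simp
    | some b =>
      rw [if_neg h, PySem.Dict.getD_modify]
      by_cases hc : c = p.1
      · subst hc
        rw [if_pos rfl, PySem.Dict.getD_insert, if_pos rfl, if_pos rfl]
        simp [PySem.Dict.getD_of_not_contains d _ h']
      · rw [if_neg hc, PySem.Dict.getD_insert, if_neg hc, if_neg (fun hx => hc hx.symm)]
        simp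

lemma foldl_step_getD (targets : List (String × Option String))
    (d : PySem.Dict String (List String)) (c : String) :
    (targets.foldl group_targets_step d).getD c [] =
      d.getD c [] ++ targets.filterMap (fun p => if p.1 = c then p.2 else none) := by
  induction targets generalizing d with
  | nil => simp
  | cons p ts ih =>
    simp only [List.foldl_cons, ih, step_getD, List.filterMap_cons]
    by_cases h : p.1 = c
    · cases p.2 <;> simp [h]
    · simp [h]

lemma foldl_step_keys (targets : List (String × Option String))
    (d : PySem.Dict String (List String)) :
    (targets.foldl group_targets_step d).keys = PySem.Set.update d.keys (targets.map Prod.fst) := by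
  induction targets generalizing d with
  | nil => simp [PySem.Set.update]
  | cons p ts ih => simp [ih, step_keys, PySem.Set.update]

lemma foldl_step_nodup (targets : List (String × Option String))
    (d : PySem.Dict String (List String)) (h : d.keys.Nodup) :
    (targets.foldl group_targets_step d).keys.Nodup := by
  induction targets generalizing d with
  | nil => simpa
  | cons p ts ih => exact ih _ (step_nodup _ _ h)

-- ===== VERDICT (by name: the statement is the Claim_ definition above) =====
theorem group_targets_spec : Claim_equal_group_targets := by
  intro targets _
  unfold Spec_group_targets group_targets group_targets_alt
  have hnd : (targets.foldl group_targets_step PySem.Dict.empty).keys.Nodup :=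
    foldl_step_nodup _ _ PySem.Dict.nodup_keys_empty
  rw [PySem.Dict.items_eq_map_keys _ hnd []]
  rw [foldl_step_keys]
  have hkeys : PySem.Set.update (PySem.Dict.empty : PySem.Dict String (List String)).keys
      (targets.map Prod.fst) = PySem.List.dedup (targets.map Prod.fst) := by
    simp [PySem.Set.update, PySem.List.dedup_eq_ofList, PySem.Set.ofList_eq_foldl]
  rw [hkeys]
  apply List.map_congr_left
  intro c _
  simp [foldl_step_getD]
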